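-- pv_equiv track=rewrite | github.com/mokarakaya/machine-learning-and-python-notes | machine_learning/ml-coding/005_matrix_operations_sparse.py | _make_sparse
-- ===== SOURCE A (Python) =====
-- from collections import defaultdict
--
-- def _make_sparse(matrix):
--     row2col = defaultdict(lambda: defaultdict(int))
--     col2row = defaultdict(lambda: defaultdict(int))
--     for idx1, row in enumerate(matrix):
--         for idx2, num in enumerate(row):
--             if num == 0:
--                 continue
--             row2col[idx1][idx2] = num
--             col2row[idx2][idx1] = num
--     return row2col, col2row
-- ===== SOURCE B (Python) =====
-- from collections import defaultdict
--
-- def _make_sparse(matrix):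
--     row2col = defaultdict(lambda: defaultdict(int))
--     for idx1, row in enumerate(matrix):
--         entries = [(idx2, num) for idx2, num in enumerate(row) if num != 0]
--         if entries:
--             row2col[idx1].update(entries)
--     col2row = defaultdict(lambda: defaultdict(int))
--     for idx1, inner in row2col.items():
--         for idx2, num in inner.items():
--             col2row[idx2][idx1] = num
--     return row2col, col2row
-- ===== Notes on version B (the rewrite author's own statement) =====
-- stated objective: alternative
-- what changed: B no longer fills col2row during the dense scan: one pass builds only row2col from the matrix, and a second pass derives col2row by transposing the sparse row2col index itself.
import Mathlib
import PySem

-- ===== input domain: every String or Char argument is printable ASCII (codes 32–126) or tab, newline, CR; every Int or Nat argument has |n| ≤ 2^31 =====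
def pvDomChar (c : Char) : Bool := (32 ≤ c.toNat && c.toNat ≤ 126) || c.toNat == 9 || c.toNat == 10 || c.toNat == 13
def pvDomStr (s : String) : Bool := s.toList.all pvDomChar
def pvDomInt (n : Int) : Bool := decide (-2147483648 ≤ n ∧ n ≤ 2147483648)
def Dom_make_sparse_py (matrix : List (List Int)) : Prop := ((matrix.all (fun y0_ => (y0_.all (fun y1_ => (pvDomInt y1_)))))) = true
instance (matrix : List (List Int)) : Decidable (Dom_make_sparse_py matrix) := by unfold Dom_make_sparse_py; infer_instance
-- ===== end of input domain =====

-- B differs from A only in decomposition (col2row is derived from the sparse index in a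
-- second pass instead of the dense scan); returned values are identical.

-- dicts-of-dicts are returned as association lists of association lists
def pvDumpDict (d : PySem.Dict Int (PySem.Dict Int Int)) : List (Int × List (Int × Int)) :=
  d.items.map (fun p => (p.1, p.2.items))

-- ===== PORT A =====
-- literal port of A: one scan over the dense matrix filling row2col and col2row together
def make_sparse_py (matrix : List (List Int)) : (List (Int × List (Int × Int))) × (List (Int × List (Int × Int))) :=
  let rc :=
    (PySem.List.enumerate matrix).foldl (fun st p =>
      (PySem.List.enumerate p.2).foldl (fun st2 q =>
        if q.2 == 0 then st2
        else (st2.1.insert p.1 ((st2.1.getD p.1 PySem.Dict.empty).insert q.1 q.2),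
              st2.2.insert q.1 ((st2.2.getD q.1 PySem.Dict.empty).insert p.1 q.2))) st)
      (PySem.Dict.empty, PySem.Dict.empty)
  (pvDumpDict rc.1, pvDumpDict rc.2)

-- ===== PORT B =====
-- literal port of B: pass 1 builds row2col from the matrix, pass 2 transposes row2col
def make_sparse_py_alt (matrix : List (List Int)) : (List (Int × List (Int × Int))) × (List (Int × List (Int × Int))) :=
  let row2col :=
    (PySem.List.enumerate matrix).foldl (fun r p =>
      let entries := ((PySem.List.enumerate p.2).filter (fun q => !(q.2 == 0))).map
        (fun q => (q.1, q.2))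
      if entries ≠ [] then r.insert p.1 ((r.getD p.1 PySem.Dict.empty).update entries) else r)
      PySem.Dict.empty
  let col2row :=
    row2col.items.foldl (fun c p =>
      p.2.items.foldl (fun c q =>
        c.insert q.1 ((c.getD q.1 PySem.Dict.empty).insert p.1 q.2)) c)
      PySem.Dict.empty
  (pvDumpDict row2col, pvDumpDict col2row)

-- ===== PRECONDITION & SPEC =====
def Spec_make_sparse_py (matrix : List (List Int)) (out : (List (Int × List (Int × Int))) × (List (Int × List (Int × Int)))) : Prop := out = make_sparse_py_alt matrix
instance (matrix : List (List Int)) (out : (List (Int × List (Int × Int))) × (List (Int × List (Int × Int)))) : Decidable (Spec_make_sparse_py matrix out) := by unfold Spec_make_sparse_py; infer_instance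

-- ===== CLAIM (what is proved, stated in full; the proofs are below) =====
def Claim_equal_make_sparse_py : Prop := ∀ (matrix : List (List Int)), Dom_make_sparse_py matrix → Spec_make_sparse_py matrix (make_sparse_py matrix)

-- ===== LEMMAS AND PROOFS =====

-- the nonzero entries of a row, with their column indices
def pvNz (row : List Int) : List (Int × Int) :=
  (PySem.List.enumerate row).filter (fun q => !(q.2 == 0))

-- the nonzero triples (rowIdx, colIdx, value) of the matrix, rows numbered from s
def pvTriples (matrix : List (List Int)) (s : Int) : List (Int × Int × Int) :=
  (PySem.List.enumerate matrix s).flatMap (fun p => (pvNz p.2).map (fun q => (p.1, q.1, q.2)))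

-- row2col / col2row insertion steps on a single triple
def pvFR (d : PySem.Dict Int (PySem.Dict Int Int)) (t : Int × Int × Int) : PySem.Dict Int (PySem.Dict Int Int) :=
  d.insert t.1 ((d.getD t.1 PySem.Dict.empty).insert t.2.1 t.2.2)
def pvFC (d : PySem.Dict Int (PySem.Dict Int Int)) (t : Int × Int × Int) : PySem.Dict Int (PySem.Dict Int Int) :=
  d.insert t.2.1 ((d.getD t.2.1 PySem.Dict.empty).insert t.1 t.2.2)

-- flatten a dict-of-dicts back into triples
def pvFlat (d : PySem.Dict Int (PySem.Dict Int Int)) : List (Int × Int × Int) :=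
  d.items.flatMap (fun p => p.2.items.map (fun q => (p.1, q.1, q.2)))

theorem pv_foldl_pair {α β γ : Type} (f : α → γ → α) (g : β → γ → β) (l : List γ) (a : α) (b : β) :
    l.foldl (fun st t => (f st.1 t, g st.2 t)) (a, b) = (l.foldl f a, l.foldl g b) := by
  induction l generalizing a b with
  | nil => rfl
  | cons x xs ih => simp [List.foldl, ih]

theorem pv_foldl_skip {α : Type} (f : α → Int × Int → α) (l : List (Int × Int)) (a : α) :
    l.foldl (fun s q => if q.2 == 0 then s else f s q) a = ((l.filter (fun q => !(q.2 == 0))).foldl f a) := by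
  induction l generalizing a with
  | nil => rfl
  | cons x xs ih =>
    by_cases h : x.2 = 0 <;> simp [List.foldl_cons, h] <;> simpa using ih _

theorem pv_foldl_flatMap {α β γ : Type} (g : β → List γ) (f : α → γ → α) (l : List β) (a : α) :
    (l.flatMap g).foldl f a = l.foldl (fun s x => (g x).foldl f s) a := by
  induction l generalizing a with
  | nil => rfl
  | cons x xs ih => simp [List.flatMap_cons, List.foldl_append, List.foldl, ih]

-- A's loop equals the pair of triple-folds
theorem pvA_eq (matrix : List (List Int)) :
    ((PySem.List.enumerate matrix).foldl (fun st p =>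
      (PySem.List.enumerate p.2).foldl (fun st2 q =>
        if q.2 == 0 then st2
        else (st2.1.insert p.1 ((st2.1.getD p.1 PySem.Dict.empty).insert q.1 q.2),
              st2.2.insert q.1 ((st2.2.getD q.1 PySem.Dict.empty).insert p.1 q.2))) st)
      (PySem.Dict.empty, PySem.Dict.empty))
    = ((pvTriples matrix 0).foldl pvFR PySem.Dict.empty,
       (pvTriples matrix 0).foldl pvFC PySem.Dict.empty) := by
  rw [← pv_foldl_pair pvFR pvFC]
  unfold pvTriples
  rw [pv_foldl_flatMap]
  simp only [List.foldl_map, pv_foldl_skip, pvNz, pvFR, pvFC]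

-- folding one row's group of triples (same first index) accumulates into one inner dict
theorem pv_group_fold (i : Int) (es : List (Int × Int)) (d : PySem.Dict Int (PySem.Dict Int Int))
    (hne : es ≠ []) :
    (es.map (fun q => (i, q.1, q.2))).foldl pvFR d
      = d.insert i (es.foldl (fun inn q => inn.insert q.1 q.2) (d.getD i PySem.Dict.empty)) := by
  induction es generalizing d with
  | nil => exact absurd rfl hne
  | cons e es ih =>
    rcases List.eq_nil_or_concat es with h | _
    · subst h; rfl
    · have hes : es ≠ [] := by rintro rfl; simp_all
      simp only [List.map_cons, List.foldl_cons, pvFR]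
      rw [ih _ hes, PySem.Dict.getD_insert_self, PySem.Dict.insert_insert_self]

-- B's first loop equals the row-fold over triples (uses pv_group_fold, stated below)
theorem pvB1_eq (matrix : List (List Int)) :
    ((PySem.List.enumerate matrix).foldl (fun r p =>
      let entries := ((PySem.List.enumerate p.2).filter (fun q => !(q.2 == 0))).map
        (fun q => (q.1, q.2))
      if entries ≠ [] then r.insert p.1 ((r.getD p.1 PySem.Dict.empty).update entries) else r)
      PySem.Dict.empty)
    = (pvTriples matrix 0).foldl pvFR PySem.Dict.empty := by
  unfold pvTriples
  rw [pv_foldl_flatMap]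
  apply PySem.List.foldl_congr_mem
  intro r p _
  have hent : ((PySem.List.enumerate p.2).filter (fun q => !(q.2 == 0))).map
      (fun q => (q.1, q.2)) = pvNz p.2 := by
    simp [pvNz]
  rw [hent]
  rcases eq_or_ne (pvNz p.2) [] with h | h
  · simp [h]
  · rw [if_pos h, pv_group_fold p.1 (pvNz p.2) r h]
    rfl

-- flattening the row2col dict recovers exactly the triples, in order
theorem pv_flat_fold (matrix : List (List Int)) (s : Int) (d : PySem.Dict Int (PySem.Dict Int Int))
    (hd : ∀ k ∈ d.keys, k < s) :
    pvFlat ((pvTriples matrix s).foldl pvFR d) = pvFlat d ++ pvTriples matrix s := by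
  induction matrix generalizing s d with
  | nil => simp [pvTriples, PySem.List.enumerate_nil]
  | cons row rest ih =>
    have hTr : pvTriples (row :: rest) s
        = (pvNz row).map (fun q => (s, q.1, q.2)) ++ pvTriples rest (s + 1) := by
      simp [pvTriples, PySem.List.enumerate_cons]
    have hnc : d.contains s = false := by
      rw [← Bool.not_eq_true, PySem.Dict.contains_iff_mem_keys]
      intro hmem; exact absurd (hd s hmem) (lt_irrefl s)
    rcases eq_or_ne (pvNz row) [] with h0 | h0
    · rw [hTr, h0, List.map_nil, List.nil_append]
      exact ih (s + 1) d (fun k hk => lt_trans (hd k hk) (by omega))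
    · rw [hTr, List.foldl_append, pv_group_fold s (pvNz row) d h0,
          PySem.Dict.getD_of_not_contains d _ hnc]
      have hitems : ((pvNz row).foldl (fun inn q => inn.insert q.1 q.2) PySem.Dict.empty).items
          = pvNz row := by
        have hnod : ((pvNz row).map Prod.fst).Nodup := by
          have hp : (pvNz row).Pairwise (fun p q => p.1 < q.1) :=
            List.Pairwise.filter _ (PySem.List.pairwise_lt_enumerate row 0)
          have hlt : ((pvNz row).map Prod.fst).Pairwise (· < ·) := List.pairwise_map.mpr hp
          exact List.Pairwise.imp (fun h => ne_of_lt h) hlt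
        have := PySem.Dict.items_foldl_insert_fresh (pvNz row) Prod.fst Prod.snd
          PySem.Dict.empty (fun a _ => PySem.Dict.contains_empty _) hnod
        simpa using this
      have hkeys' : ∀ k ∈ (d.insert s ((pvNz row).foldl (fun inn q => inn.insert q.1 q.2)
          PySem.Dict.empty)).keys, k < s + 1 := by
        intro k hk
        rw [PySem.Dict.keys_insert_of_not_contains d _ hnc] at hk
        rcases List.mem_append.mp hk with hk | hk
        · exact lt_trans (hd k hk) (by omega)
        · simp at hk; omega
      rw [ih (s + 1) _ hkeys']
      unfold pvFlat
      rw [PySem.Dict.items_insert_of_not_contains d _ hnc, List.flatMap_append]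
      simp [hitems]

-- ===== VERDICT (by name: the statement is the Claim_ definition above) =====
theorem make_sparse_py_spec : Claim_equal_make_sparse_py := by
  intro matrix _
  unfold Spec_make_sparse_py make_sparse_py make_sparse_py_alt
  rw [pvA_eq, pvB1_eq]
  set R := (pvTriples matrix 0).foldl pvFR PySem.Dict.empty with hR
  have h0 : ∀ k ∈ (PySem.Dict.empty : PySem.Dict Int (PySem.Dict Int Int)).keys, k < 0 := by
    simp [PySem.Dict.keys_empty]
  have hflat' : pvFlat R = pvTriples matrix 0 := by
    have := pv_flat_fold matrix 0 PySem.Dict.empty h0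
    rw [← hR] at this
    simpa [pvFlat] using this
  have hsec : R.items.foldl (fun c p => p.2.items.foldl
        (fun c q => c.insert q.1 ((c.getD q.1 PySem.Dict.empty).insert p.1 q.2)) c)
        PySem.Dict.empty
      = (pvTriples matrix 0).foldl pvFC PySem.Dict.empty := by
    rw [← hflat']
    unfold pvFlat
    rw [pv_foldl_flatMap]
    simp only [List.foldl_map, pvFC]
  simp only [hsec]
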